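-- pv_equiv track=rewrite | github.com/Zz-sev-point/IC_SIM | python/lowest_delay.py | filter_lowest_delay_by_precision
-- ===== SOURCE A (Python) =====
-- from collections import defaultdict
--
-- def filter_lowest_delay_by_precision(data_entries):
--     """Group by bit precision, then for each bandwidth keep the lowest delay entry."""
--     precision_groups = defaultdict(list)
--     for entry in data_entries:
--         if all(val is not None for val in entry.values()):
--             precision_groups[entry['bit_precision']].append(entry)
--
--     filtered_data = defaultdict(list)
--     for precision, entries in precision_groups.items():
--         # Group by bandwidth for this precision
--         bw_groups = defaultdict(list)
--         for entry in entries: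
--             bw_groups[entry['bandwidth']].append(entry)
--
--         # For each bandwidth, find minimal delay config with smallest crossbar
--         for bw, bw_entries in bw_groups.items():
--             # Find minimum delay
--             min_delay = min(entry['delay'] for entry in bw_entries)
--
--             # Filter entries with this delay
--             min_delay_entries = [e for e in bw_entries if e['delay'] == min_delay]
--
--             # Among these, select the one with smallest crossbar
--             optimal_entry = min(min_delay_entries, key=lambda x: x['crossbar_size'])
--             filtered_data[precision].append(optimal_entry)
--
--     return filtered_data
-- ===== SOURCE B (Python) =====
-- from collections import defaultdict
--
-- def filter_lowest_delay_by_precision(data_entries):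
--     """Group by bit precision, then for each bandwidth keep the lowest delay entry."""
--     best = {}
--     for entry in data_entries:
--         if any(val is None for val in entry.values()):
--             continue
--         key = (entry['bit_precision'], entry['bandwidth'])
--         cur = best.get(key)
--         if cur is None or (entry['delay'], entry['crossbar_size']) < (cur['delay'], cur['crossbar_size']):
--             best[key] = entry
--     result = defaultdict(list)
--     for (precision, _bw), entry in best.items():
--         result[precision].append(entry)
--     return result
-- ===== Notes on version B (the rewrite author's own statement) =====
-- stated objective: alternative
-- what changed: Replaces A's two-stage grouping (group by precision, regroup by bandwidth, then three scans per group: min delay, filter, min crossbar) by a single pass keeping one running best entry per (precision, bandwidth) key under strict lexicographic (delay, crossbar_size) comparison, then one regrouping pass by precision.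
import Mathlib
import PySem

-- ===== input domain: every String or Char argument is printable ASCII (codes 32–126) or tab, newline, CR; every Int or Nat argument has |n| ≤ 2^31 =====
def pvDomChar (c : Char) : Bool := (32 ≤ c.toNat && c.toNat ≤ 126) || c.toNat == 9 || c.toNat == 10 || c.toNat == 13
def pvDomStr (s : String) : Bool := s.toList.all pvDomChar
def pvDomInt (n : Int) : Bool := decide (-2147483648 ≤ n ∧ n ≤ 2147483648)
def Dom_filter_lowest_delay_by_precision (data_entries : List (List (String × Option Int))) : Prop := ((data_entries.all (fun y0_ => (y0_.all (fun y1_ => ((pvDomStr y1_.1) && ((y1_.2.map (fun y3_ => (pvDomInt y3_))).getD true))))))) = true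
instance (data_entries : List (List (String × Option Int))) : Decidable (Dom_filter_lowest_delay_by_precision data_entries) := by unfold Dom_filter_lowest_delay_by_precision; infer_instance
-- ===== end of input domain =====

-- B replaces A's two-stage grouping (by precision, then by bandwidth, with three scans per
-- bandwidth group) by a single pass keeping one running best entry per (precision, bandwidth)
-- key, then one regrouping pass by precision (objective: alternative, same asymptotic cost).

-- Each Python 'entry' is a dict: normalise the association list to its dict items
-- (first key position, last value wins), exactly Python's dict(pairs).
def pvNorm (e : List (String × Option Int)) : List (String × Option Int) :=
  (PySem.Dict.ofList e).items

-- entry[k] on a normalised entry; total stand-in (Pre_ excludes the KeyError inputs).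
def pvGet (e : List (String × Option Int)) (k : String) : Int :=
  (((PySem.Dict.mk e).get? k).getD none).getD 0

-- ===== PORT A =====
def filter_lowest_delay_by_precision (data_entries : List (List (String × Option Int))) : List (Int × List (List (String × Option Int))) :=
  let precision_groups : PySem.Dict Int (List (List (String × Option Int))) :=
    data_entries.foldl (fun g e =>
      let entry := pvNorm e
      if entry.all (fun p => p.2.isSome) then
        g.modify (pvGet entry "bit_precision") [] (· ++ [entry])
      else g) PySem.Dict.empty
  let filtered_data : PySem.Dict Int (List (List (String × Option Int))) :=
    precision_groups.items.foldl (fun fd pe =>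
      let bw_groups : PySem.Dict Int (List (List (String × Option Int))) :=
        pe.2.foldl (fun g entry => g.modify (pvGet entry "bandwidth") [] (· ++ [entry])) PySem.Dict.empty
      bw_groups.items.foldl (fun fd be =>
        let min_delay := (PySem.List.min? (be.2.map (fun entry => pvGet entry "delay")) (fun x => x)).getD 0
        let min_delay_entries := be.2.filter (fun entry => pvGet entry "delay" == min_delay)
        let optimal_entry := (PySem.List.min? min_delay_entries (fun x => pvGet x "crossbar_size")).getD []
        fd.modify pe.1 [] (· ++ [optimal_entry])) fd) PySem.Dict.empty
  filtered_data.items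

-- ===== PORT B =====
def filter_lowest_delay_by_precision_alt (data_entries : List (List (String × Option Int))) : List (Int × List (List (String × Option Int))) :=
  let best : PySem.Dict (Int × Int) (List (String × Option Int)) :=
    data_entries.foldl (fun b e =>
      let entry := pvNorm e
      if entry.any (fun p => p.2.isNone) then b
      else
        let k := (pvGet entry "bit_precision", pvGet entry "bandwidth")
        match b.get? k with
        | none => b.insert k entry
        | some cur =>
          if pvGet entry "delay" < pvGet cur "delay" ∨
             (pvGet entry "delay" = pvGet cur "delay" ∧
              pvGet entry "crossbar_size" < pvGet cur "crossbar_size") then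
            b.insert k entry
          else b) PySem.Dict.empty
  let result : PySem.Dict Int (List (List (String × Option Int))) :=
    best.items.foldl (fun r ke => r.modify ke.1.1 [] (· ++ [ke.2])) PySem.Dict.empty
  result.items

-- ===== PRECONDITION & SPEC =====
-- Pre_ excludes the KeyError inputs: an entry whose values are all non-None but which lacks one of
-- the four accessed keys makes Python A raise (or, when only 'crossbar_size' is missing on a
-- non-minimal entry, A returns but B itself raises there).
def Pre_filter_lowest_delay_by_precision (data_entries : List (List (String × Option Int))) : Prop :=
  ∀ e ∈ data_entries,
    (PySem.Dict.ofList e).values.all (fun v => v.isSome) = true →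
    ("bit_precision" ∈ (PySem.Dict.ofList e).keys ∧ "bandwidth" ∈ (PySem.Dict.ofList e).keys ∧
     "delay" ∈ (PySem.Dict.ofList e).keys ∧ "crossbar_size" ∈ (PySem.Dict.ofList e).keys)
instance (data_entries : List (List (String × Option Int))) : Decidable (Pre_filter_lowest_delay_by_precision data_entries) := by unfold Pre_filter_lowest_delay_by_precision; infer_instance

def pvWitness_filter_lowest_delay_by_precision : (List (List (String × Option Int))) :=
  [[("bit_precision", some 1), ("bandwidth", some 2), ("delay", some 3), ("crossbar_size", some 4)]]

def Spec_filter_lowest_delay_by_precision (data_entries : List (List (String × Option Int))) (out : List (Int × List (List (String × Option Int)))) : Prop := out = filter_lowest_delay_by_precision_alt data_entries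
instance (data_entries : List (List (String × Option Int))) (out : List (Int × List (List (String × Option Int)))) : Decidable (Spec_filter_lowest_delay_by_precision data_entries out) := by unfold Spec_filter_lowest_delay_by_precision; infer_instance

-- ===== CLAIM (what is proved, stated in full; the proofs are below) =====
def Claim_equal_filter_lowest_delay_by_precision : Prop := ∀ (data_entries : List (List (String × Option Int))), Dom_filter_lowest_delay_by_precision data_entries → Pre_filter_lowest_delay_by_precision data_entries → Spec_filter_lowest_delay_by_precision data_entries (filter_lowest_delay_by_precision data_entries)

-- ===== LEMMAS AND PROOFS =====

-- ---------- abbreviations ----------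
abbrev PvE : Type := List (String × Option Int)
def pvDl (e : PvE) : Int := pvGet e "delay"
def pvCs (e : PvE) : Int := pvGet e "crossbar_size"
def pvPk (e : PvE) : Int := pvGet e "bit_precision"
def pvBk (e : PvE) : Int := pvGet e "bandwidth"
def pvF (e : PvE) : Int × Int := (pvDl e, pvCs e)
def pvFCs (e : PvE) : Int × Int := (pvCs e, 0)
def pvKey (e : PvE) : Int × Int := (pvPk e, pvBk e)
def pvKeepB (e : PvE) : Bool := e.all (fun p => p.2.isSome)
def pvKept (d : List PvE) : List PvE := (d.map pvNorm).filter pvKeepB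
def pvLtb (a b : Int × Int) : Bool := a.1 < b.1 || (a.1 == b.1 && a.2 < b.2)

theorem pvLtb_iff (a b : Int × Int) :
    pvLtb a b = true ↔ (a.1 < b.1 ∨ (a.1 = b.1 ∧ a.2 < b.2)) := by
  simp [pvLtb]

-- first lex-minimum, recursively from the head
def pvFm (g : PvE → Int × Int) (h : PvE) : List PvE → PvE
  | [] => h
  | e :: t => let r := pvFm g e t; if pvLtb (g r) (g h) then r else h

def pvPs (d : List (List (String × Option Int))) : List Int :=
  PySem.List.dedup ((pvKept d).map pvPk)
def pvGrp (d : List (List (String × Option Int))) (p : Int) : List PvE :=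
  (pvKept d).filter (fun e => pvPk e == p)
def pvBws (d : List (List (String × Option Int))) (p : Int) : List Int :=
  PySem.List.dedup ((pvGrp d p).map pvBk)
def pvGB (d : List (List (String × Option Int))) (p bw : Int) : List PvE :=
  (pvGrp d p).filter (fun e => pvBk e == bw)
def pvPick (g : List PvE) : PvE :=
  let md := (PySem.List.min? (g.map (fun e => pvDl e)) (fun x => x)).getD 0
  (PySem.List.min? (g.filter (fun e => pvDl e == md)) (fun e => pvCs e)).getD []
def pvRhs (d : List (List (String × Option Int))) : List (Int × List (List (String × Option Int))) :=
  (pvPs d).map (fun p => (p, (pvBws d p).map (fun bw => pvPick (pvGB d p bw))))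

-- ---------- generic list/Set lemmas ----------
theorem pvAnyNone (e : PvE) : (e.any (fun p => p.2.isNone)) = !pvKeepB e := by
  unfold pvKeepB
  induction e with
  | nil => rfl
  | cons x t ih => cases hx : x.2 <;> simp [List.any_cons, List.all_cons, hx, ih]

theorem pvFoldlFlat {α γ δ : Type} (ls : List α) (h : α → List γ) (f : δ → γ → δ) (i : δ) :
    ls.foldl (fun a x => (h x).foldl f a) i = (ls.flatMap h).foldl f i := by
  induction ls generalizing i with
  | nil => rfl
  | cons x ls ih => simp [List.flatMap_cons, List.foldl_append, ih]

theorem pvSetAddMap {α β : Type} [BEq α] [LawfulBEq α] [BEq β] [LawfulBEq β] (f : α → β)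
    (hinj : Function.Injective f) (s : PySem.Set α) (x : α) :
    (PySem.Set.add s x).map f = PySem.Set.add (s.map f) (f x) := by
  by_cases hx : x ∈ s
  · have : f x ∈ s.map f := List.mem_map_of_mem hx
    simp [PySem.Set.add, PySem.Set.contains, hx, this]
  · have : f x ∉ s.map f := by
      intro hm
      rcases List.mem_map.mp hm with ⟨y, hy, hfy⟩
      exact hx (hinj hfy ▸ hy)
    simp [PySem.Set.add, PySem.Set.contains, hx, this]

theorem pvSetUpdateMap {α β : Type} [BEq α] [LawfulBEq α] [BEq β] [LawfulBEq β] (f : α → β)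
    (hinj : Function.Injective f) (l : List α) (s : PySem.Set α) :
    PySem.Set.update (s.map f) (l.map f) = (PySem.Set.update s l).map f := by
  induction l generalizing s with
  | nil => simp [PySem.Set.update]
  | cons x l ih =>
      rw [List.map_cons, PySem.Set.update_cons, PySem.Set.update_cons,
        ← pvSetAddMap f hinj, ih]

theorem pvDedupMapInj {α β : Type} [BEq α] [LawfulBEq α] [BEq β] [LawfulBEq β] (f : α → β)
    (hinj : Function.Injective f) (l : List α) :
    PySem.List.dedup (l.map f) = (PySem.List.dedup l).map f := by
  have h := pvSetUpdateMap f hinj l []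
  simpa [PySem.List.dedup_eq_ofList, ← PySem.Set.update_nil_left] using h

theorem pvSetAddFilter {α : Type} [BEq α] [LawfulBEq α] (q : α → Bool) (s : PySem.Set α) (x : α) :
    (PySem.Set.add s x).filter q = if q x then PySem.Set.add (s.filter q) x else s.filter q := by
  by_cases hx : x ∈ s
  · have hxf : q x = true → x ∈ s.filter q := fun hq => List.mem_filter.mpr ⟨hx, hq⟩
    cases hq : q x <;> simp [PySem.Set.add, PySem.Set.contains, hx, hq, hxf]
  · have hxf : x ∉ s.filter q := fun hm => hx (List.mem_of_mem_filter hm)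
    cases hq : q x <;>
      simp [PySem.Set.add, PySem.Set.contains, hx, hxf, List.filter_append, hq]

theorem pvSetUpdateFilter {α : Type} [BEq α] [LawfulBEq α] (q : α → Bool) (l : List α) (s : PySem.Set α) :
    (PySem.Set.update s l).filter q = PySem.Set.update (s.filter q) (l.filter q) := by
  induction l generalizing s with
  | nil => simp [PySem.Set.update]
  | cons x l ih =>
      rw [PySem.Set.update_cons, ih, pvSetAddFilter]
      cases hq : q x <;> simp [hq, PySem.Set.update_cons]

theorem pvDedupFilter {α : Type} [BEq α] [LawfulBEq α] (q : α → Bool) (l : List α) :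
    (PySem.List.dedup l).filter q = PySem.List.dedup (l.filter q) := by
  have h := pvSetUpdateFilter q l []
  simpa [PySem.List.dedup_eq_ofList, ← PySem.Set.update_nil_left] using h

theorem pvOfListConstNe {α β : Type} [BEq β] [LawfulBEq β] (l : List α) (hl : l ≠ []) (p : β) :
    PySem.Set.ofList (l.map (fun _ => p)) = [p] := by
  induction l with
  | nil => simp at hl
  | cons x l ih =>
      rcases List.eq_nil_or_concat l with h | _
      · simp [h, PySem.Set.ofList, PySem.Set.update, PySem.Set.add, PySem.Set.contains]
      · have hl' : l ≠ [] := by rintro rfl; simp_all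
        rw [List.map_cons, ← PySem.Set.update_nil_left, PySem.Set.update_cons,
          PySem.Set.update_eq_append_filter, ih hl']
        simp [PySem.Set.add, PySem.Set.contains]

theorem pvFilterEqSelf {α : Type} [BEq α] [LawfulBEq α] (l : List α) (p : α) (hp : p ∉ l) :
    l.filter (fun y => !(y == p)) = l := by
  apply List.filter_eq_self.mpr
  intro a ha
  simp only [Bool.not_eq_eq_eq_not, Bool.not_true, beq_eq_false_iff_ne]
  rintro rfl; exact hp ha

theorem pvDedupBlocks {α : Type} [BEq α] [LawfulBEq α] (ps : List α) (F : α → List α)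
    (hnd : ps.Nodup) (hF : ∀ p ∈ ps, F p ≠ []) :
    PySem.List.dedup (ps.flatMap (fun p => (F p).map (fun _ => p))) = ps := by
  induction ps with
  | nil => rfl
  | cons p ps ih =>
      have hnd' := (List.nodup_cons.mp hnd).2
      have hp : p ∉ ps := (List.nodup_cons.mp hnd).1
      rw [List.flatMap_cons, PySem.List.dedup_eq_ofList, PySem.Set.ofList_append,
        PySem.Set.update_eq_append_filter,
        pvOfListConstNe (F p) (hF p (List.mem_cons_self)) p]
      have hrest : PySem.Set.ofList (ps.flatMap fun q => (F q).map fun _ => q) = ps := by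
        rw [← PySem.List.dedup_eq_ofList]
        exact ih hnd' (fun q hq => hF q (List.mem_cons_of_mem _ hq))
      rw [hrest]
      have : (ps.filter fun y => !PySem.Set.contains [p] y) = ps := by
        have := pvFilterEqSelf ps p hp
        simpa [PySem.Set.contains] using this
      rw [this]
      rfl

theorem pvFilterBlocks {α β : Type} [BEq α] [LawfulBEq α] (ps : List α) (G : α → List β)
    (k : β → α) (hk : ∀ p ∈ ps, ∀ x ∈ G p, k x = p)
    (hnd : ps.Nodup) (p : α) (hp : p ∈ ps) :
    (ps.flatMap G).filter (fun x => k x == p) = G p := by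
  induction ps with
  | nil => simp at hp
  | cons q ps ih =>
      have hnd' := (List.nodup_cons.mp hnd).2
      have hq : q ∉ ps := (List.nodup_cons.mp hnd).1
      rw [List.flatMap_cons, List.filter_append]
      rcases List.mem_cons.mp hp with rfl | hp'
      · have h1 : (G p).filter (fun x => k x == p) = G p :=
          List.filter_eq_self.mpr (fun x hx => by
            simp [hk p (List.mem_cons_self) x hx])
        have h2 : (ps.flatMap G).filter (fun x => k x == p) = [] := by
          apply List.filter_eq_nil_iff.mpr
          intro x hx
          rcases List.mem_flatMap.mp hx with ⟨q', hq', hxq'⟩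
          have := hk q' (List.mem_cons_of_mem _ hq') x hxq'
          simp only [beq_iff_eq, this]
          rintro rfl; exact hq hq'
        rw [h1, h2, List.append_nil]
      · have h1 : (G q).filter (fun x => k x == p) = [] := by
          apply List.filter_eq_nil_iff.mpr
          intro x hx
          have := hk q (List.mem_cons_self) x hx
          simp only [beq_iff_eq, this]
          rintro rfl; exact hq hp'
        rw [h1, List.nil_append]
        exact ih (fun r hr => hk r (List.mem_cons_of_mem _ hr)) hnd' hp'

-- ---------- the grouping fold ----------
theorem pvGroupItems {κ ν : Type} [BEq κ] [LawfulBEq κ] (P : List (κ × ν)) :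
    (P.foldl (fun d p => d.modify p.1 [] (· ++ [p.2])) PySem.Dict.empty).items
      = (PySem.List.dedup (P.map (·.1))).map
          (fun c => (c, (P.filter (fun p => p.1 == c)).map (·.2))) := by
  have hkeys : (P.foldl (fun d p => d.modify p.1 [] (· ++ [p.2])) PySem.Dict.empty).keys
      = PySem.List.dedup (P.map (·.1)) := by
    have h := PySem.Dict.keys_foldl_modify_key P (fun p => p.1) ([] : List ν)
      (fun _ p v => v ++ [p.2]) PySem.Dict.empty
    simpa [PySem.List.dedup_eq_ofList, PySem.Set.update_nil_left, PySem.Dict.keys_empty] using h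
  have hnd : (P.foldl (fun d p => d.modify p.1 [] (· ++ [p.2])) PySem.Dict.empty).keys.Nodup := by
    rw [hkeys, PySem.List.dedup_eq_ofList]; exact PySem.Set.nodup_ofList _
  rw [PySem.Dict.items_eq_map_keys _ hnd ([] : List ν), hkeys]
  apply List.map_congr_left
  intro c _
  have h := PySem.Dict.getD_foldl_modify_append P PySem.Dict.empty c
  simp only [PySem.Dict.getD_empty, List.nil_append] at h
  simp [h]

-- ---------- first-lex-min machinery ----------
theorem pvFmStep (g : PvE → Int × Int) (t : List PvE) (e h : PvE) :
    pvFm g h (e :: t) = pvFm g (if pvLtb (g e) (g h) then e else h) t := by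
  induction t generalizing e h with
  | nil => simp [pvFm]
  | cons x t ih =>
      have hx := ih (e := x)
      simp only [pvFm] at *
      by_cases h1 : pvLtb (g (pvFm g x t)) (g e) = true <;>
        by_cases h2 : pvLtb (g e) (g h) = true <;>
          by_cases h3 : pvLtb (g (pvFm g x t)) (g h) = true <;>
            simp [hx, h1, h2, h3] <;>
              (exfalso; simp only [pvLtb_iff] at h1 h2 h3; omega)

theorem pvFoldlFm (g : PvE → Int × Int) (t : List PvE) (h : PvE) :
    t.foldl (fun a e => if pvLtb (g e) (g a) then e else a) h = pvFm g h t := by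
  induction t generalizing h with
  | nil => rfl
  | cons e t ih => rw [List.foldl_cons, ih, ← pvFmStep]

def pvIsFM (g : PvE → Int × Int) (l : List PvE) (m : PvE) : Prop :=
  (∀ y ∈ l, ¬ pvLtb (g y) (g m) = true) ∧
  ∃ l1 l2, l = l1 ++ m :: l2 ∧ ∀ y ∈ l1, pvLtb (g m) (g y) = true

theorem pvFmIsFM (g : PvE → Int × Int) (t : List PvE) (h : PvE) :
    pvIsFM g (h :: t) (pvFm g h t) := by
  induction t generalizing h with
  | nil =>
      refine ⟨?_, [], [], rfl, by simp⟩
      intro y hy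
      simp only [List.mem_singleton] at hy
      subst hy
      simp only [pvFm, pvLtb_iff]
      omega
  | cons e t ih =>
      obtain ⟨hglob, l1, l2, hsplit, hbef⟩ := ih (h := e)
      simp only [pvFm]
      by_cases h1 : pvLtb (g (pvFm g e t)) (g h) = true
      · simp only [h1, if_pos]
        refine ⟨?_, h :: l1, l2, by rw [hsplit]; rfl, ?_⟩
        · intro y hy
          rcases List.mem_cons.mp hy with rfl | hy'
          · simp only [pvLtb_iff] at h1 ⊢; omega
          · exact hglob y hy'
        · intro y hy
          rcases List.mem_cons.mp hy with rfl | hy'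
          · exact h1
          · exact hbef y hy'
      · rw [if_neg h1]
        refine ⟨?_, [], e :: t, rfl, by simp⟩
        intro y hy
        rcases List.mem_cons.mp hy with rfl | hy'
        · simp only [pvLtb_iff]; omega
        · have hyr := hglob y hy'
          simp only [pvLtb_iff] at h1 hyr ⊢
          omega

theorem pvFMUnique (g : PvE → Int × Int) (l : List PvE) (m m' : PvE)
    (h1 : pvIsFM g l m) (h2 : pvIsFM g l m') : m = m' := by
  obtain ⟨hg1, l1, l2, hs1, hb1⟩ := h1
  obtain ⟨hg2, l1', l2', hs2, hb2⟩ := h2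
  have hm : m ∈ l := by rw [hs1]; exact List.mem_append_right _ (List.mem_cons_self)
  have hm' : m' ∈ l := by rw [hs2]; exact List.mem_append_right _ (List.mem_cons_self)
  have e1 := hg1 m' hm'
  have e2 := hg2 m hm
  have hgeq : g m = g m' := by
    simp only [pvLtb_iff] at e1 e2
    rw [Prod.ext_iff]
    constructor <;> omega
  have hcomb : l1 ++ m :: l2 = l1' ++ m' :: l2' := by rw [← hs1, ← hs2]
  rcases List.append_eq_append_iff.mp hcomb with ⟨as, h1', h2'⟩ | ⟨bs, h1', h2'⟩
  · cases as with
    | nil => exact (by simpa using h2' : m = m' ∧ l2 = l2').1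
    | cons x as' =>
        exfalso
        have hx : m = x := by simpa using congrArg (fun l => l.headI) h2'
        have hmem : m ∈ l1' := by
          rw [h1', hx]; exact List.mem_append_right _ (List.mem_cons_self)
        have := hb2 m hmem
        simp only [pvLtb_iff, hgeq] at this
        omega
  · cases bs with
    | nil => exact ((by simpa using h2' : m' = m ∧ l2' = l2).1).symm
    | cons x bs' =>
        exfalso
        have hx : m' = x := by simpa using congrArg (fun l => l.headI) h2'
        have hmem : m' ∈ l1 := by
          rw [h1', hx]; exact List.mem_append_right _ (List.mem_cons_self)
        have := hb1 m' hmem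
        simp only [pvLtb_iff, hgeq] at this
        omega

theorem pvMin?Cons (key : PvE → Int) (h : PvE) (t : List PvE) :
    PySem.List.min? (h :: t) key
      = some (t.foldl (fun m x => if key x < key m then x else m) h) := by
  show List.foldl _ none (h :: t) = _
  rw [List.foldl_cons]
  show List.foldl _ (some h) t = _
  induction t generalizing h with
  | nil => rfl
  | cons x t ih =>
      rw [List.foldl_cons, List.foldl_cons]
      by_cases hc : key x < key h <;> simp only [hc, if_pos, if_neg, ite_true, ite_false] <;>
        [exact ih x; skip] <;> simp [hc, ih h]

-- A's three-scan pick of a nonempty group is the first lexicographic (delay, crossbar) minimum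
theorem pvPickEq (h : PvE) (t : List PvE) :
    pvPick (h :: t) = pvFm pvF h t := by
  obtain ⟨hglob, l1, l2, hsplit, hbef⟩ := pvFmIsFM pvF t h
  set m := pvFm pvF h t with hm_def
  have hm : m ∈ h :: t := by
    rw [hsplit]; exact List.mem_append_right _ List.mem_cons_self
  simp only [pvPick, List.map_cons, PySem.List.min?_id_cons, Option.getD_some]
  set md := (t.map (fun e => pvDl e)).foldl min (pvDl h) with hmd_def
  have hle : ∀ y ∈ h :: t, md ≤ pvDl y := by
    intro y hy
    have hfml := PySem.List.foldl_min_le (t.map (fun e => pvDl e)) (pvDl h)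
    rcases List.mem_cons.mp hy with rfl | hy'
    · exact hfml.1
    · exact hfml.2 _ (List.mem_map_of_mem hy')
  have hmem : ∃ y ∈ h :: t, pvDl y = md := by
    rcases PySem.List.foldl_min_mem (t.map (fun e => pvDl e)) (pvDl h) with h' | h'
    · exact ⟨h, List.mem_cons_self, h'.symm⟩
    · rcases List.mem_map.mp h' with ⟨y, hy, hyd⟩
      exact ⟨y, List.mem_cons_of_mem _ hy, hyd⟩
  have hdlm : pvDl m = md := by
    have h1 : md ≤ pvDl m := hle m hm
    obtain ⟨y, hy, hyd⟩ := hmem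
    have h2 := hglob y hy
    have h3 := hle y hy
    simp only [pvLtb_iff, pvF] at h2
    omega
  have hmF : m ∈ (h :: t).filter (fun e => pvDl e == md) :=
    List.mem_filter.mpr ⟨hm, by simp [hdlm]⟩
  have hFMm : pvIsFM pvFCs ((h :: t).filter (fun e => pvDl e == md)) m := by
    constructor
    · intro y hy
      have hyl := List.mem_of_mem_filter hy
      have hyd : pvDl y = md := by
        have := (List.mem_filter.mp hy).2; simpa using this
      have := hglob y hyl
      simp only [pvLtb_iff, pvF, pvFCs] at this ⊢
      omega
    · refine ⟨l1.filter (fun e => pvDl e == md), l2.filter (fun e => pvDl e == md), ?_, ?_⟩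
      · rw [hsplit, List.filter_append, List.filter_cons]
        simp [hdlm]
      · intro y hy
        have hyl : y ∈ l1 := List.mem_of_mem_filter hy
        have hyd : pvDl y = md := by
          have := (List.mem_filter.mp hy).2; simpa using this
        have := hbef y hyl
        simp only [pvLtb_iff, pvF, pvFCs] at this ⊢
        omega
  cases hF : (h :: t).filter (fun e => pvDl e == md) with
  | nil => rw [hF] at hmF; simp at hmF
  | cons h' t' =>
      rw [hF] at hFMm
      rw [pvMin?Cons]
      have hfold : t'.foldl (fun m x => if pvCs x < pvCs m then x else m) h'
          = pvFm pvFCs h' t' := by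
        rw [← pvFoldlFm pvFCs t' h']
        refine PySem.List.foldl_congr_mem _ _ _ _ (fun acc x _ => ?_)
        have hiff : (pvLtb (pvFCs x) (pvFCs acc) = true) ↔ pvCs x < pvCs acc := by
          simp [pvLtb_iff, pvFCs]
        by_cases hc : pvCs x < pvCs acc
        · rw [if_pos hc, if_pos (hiff.mpr hc)]
        · rw [if_neg hc, if_neg (fun hh => hc (hiff.mp hh))]
      have huniq := pvFMUnique pvFCs (h' :: t') _ _ (pvFmIsFM pvFCs t' h') hFMm
      rw [hfold, huniq, Option.getD_some]

-- ---------- characterizing port A ----------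
def pvPhase1 (data_entries : List (List (String × Option Int))) : PySem.Dict Int (List PvE) :=
  data_entries.foldl (fun g e =>
    let entry := pvNorm e
    if entry.all (fun p => p.2.isSome) then
      g.modify (pvGet entry "bit_precision") [] (· ++ [entry])
    else g) PySem.Dict.empty

def pvPhase2 (precision_groups : PySem.Dict Int (List PvE)) : PySem.Dict Int (List PvE) :=
  precision_groups.items.foldl (fun fd pe =>
    let bw_groups : PySem.Dict Int (List (List (String × Option Int))) :=
      pe.2.foldl (fun g entry => g.modify (pvGet entry "bandwidth") [] (· ++ [entry])) PySem.Dict.empty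
    bw_groups.items.foldl (fun fd be =>
      let min_delay := (PySem.List.min? (be.2.map (fun entry => pvGet entry "delay")) (fun x => x)).getD 0
      let min_delay_entries := be.2.filter (fun entry => pvGet entry "delay" == min_delay)
      let optimal_entry := (PySem.List.min? min_delay_entries (fun x => pvGet x "crossbar_size")).getD []
      fd.modify pe.1 [] (· ++ [optimal_entry])) fd) PySem.Dict.empty

theorem pvAPhases (d : List (List (String × Option Int))) :
    filter_lowest_delay_by_precision d = (pvPhase2 (pvPhase1 d)).items := rfl

theorem pvPhase1Items (d : List (List (String × Option Int))) :
    (pvPhase1 d).items = (pvPs d).map (fun p => (p, pvGrp d p)) := by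
  have h1 : pvPhase1 d = ((pvKept d).map (fun e => (pvPk e, e))).foldl
      (fun g q => g.modify q.1 [] (· ++ [q.2])) PySem.Dict.empty := by
    rw [List.foldl_map]
    unfold pvKept
    rw [List.foldl_filter, List.foldl_map]
    rfl
  rw [h1, pvGroupItems]
  rw [List.map_map]
  have hfst : ((fun q : Int × PvE => q.1) ∘ fun e => (pvPk e, e)) = pvPk := rfl
  rw [hfst]
  apply List.map_congr_left
  intro c _
  rw [List.filter_map]
  rw [List.map_map]
  simp only [Function.comp_def, List.map_id']
  rfl

theorem pvBwItems (entries : List PvE) :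
    (entries.foldl (fun g entry => g.modify (pvGet entry "bandwidth") [] (· ++ [entry]))
        PySem.Dict.empty).items
      = (PySem.List.dedup (entries.map pvBk)).map
          (fun bw => (bw, entries.filter (fun e => pvBk e == bw))) := by
  have h1 : entries.foldl (fun g entry => g.modify (pvGet entry "bandwidth") [] (· ++ [entry]))
      PySem.Dict.empty = ((entries.map (fun e => (pvBk e, e))).foldl
        (fun g q => g.modify q.1 [] (· ++ [q.2])) PySem.Dict.empty) := by
    rw [List.foldl_map]; rfl
  rw [h1, pvGroupItems, List.map_map]
  have hfst : ((fun q : Int × PvE => q.1) ∘ fun e => (pvBk e, e)) = pvBk := rfl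
  rw [hfst]
  apply List.map_congr_left
  intro c _
  rw [List.filter_map, List.map_map]
  simp only [Function.comp_def, List.map_id']

theorem pvAEq (d : List (List (String × Option Int))) :
    filter_lowest_delay_by_precision d = pvRhs d := by
  rw [pvAPhases]
  unfold pvPhase2
  rw [pvPhase1Items]
  -- rewrite the loop body: each iteration folds the per-bandwidth pick pairs into fd
  have hbody : ∀ (fd : PySem.Dict Int (List PvE)) (pe : Int × List PvE),
      pe ∈ (pvPs d).map (fun p => (p, pvGrp d p)) →
      ((pe.2.foldl (fun g entry => g.modify (pvGet entry "bandwidth") [] (· ++ [entry]))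
          PySem.Dict.empty).items.foldl (fun fd be =>
        fd.modify pe.1 [] (· ++ [(PySem.List.min? (be.2.filter (fun entry =>
            pvGet entry "delay" == (PySem.List.min? (be.2.map (fun entry => pvGet entry "delay"))
              (fun x => x)).getD 0)) (fun x => pvGet x "crossbar_size")).getD []])) fd)
      = (((PySem.List.dedup (pe.2.map pvBk)).map
          (fun bw => (pe.1, pvPick (pe.2.filter (fun e => pvBk e == bw))))).foldl
            (fun fd q => fd.modify q.1 [] (· ++ [q.2])) fd) := by
    intro fd pe _
    rw [pvBwItems, List.foldl_map, List.foldl_map]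
    rfl
  rw [PySem.List.foldl_congr_mem _ _ _ _ hbody]
  rw [pvFoldlFlat, List.flatMap_map]
  rw [pvGroupItems]
  have hnd : (pvPs d).Nodup := by
    unfold pvPs
    rw [PySem.List.dedup_eq_ofList]
    exact PySem.Set.nodup_ofList _
  have hne : ∀ p ∈ pvPs d, pvBws d p ≠ [] := by
    intro p hp
    unfold pvPs at hp
    rw [PySem.List.mem_dedup] at hp
    rcases List.mem_map.mp hp with ⟨e, he, rfl⟩
    have heg : e ∈ pvGrp d (pvPk e) := List.mem_filter.mpr ⟨he, by simp⟩
    have : pvBk e ∈ pvBws d (pvPk e) := by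
      unfold pvBws
      rw [PySem.List.mem_dedup]
      exact List.mem_map_of_mem heg
    exact List.ne_nil_of_mem this
  have hps : (((pvPs d).flatMap fun p =>
      (PySem.List.dedup ((pvGrp d p).map pvBk)).map
        (fun bw => (p, pvPick ((pvGrp d p).filter (fun e => pvBk e == bw))))).map (·.1))
      = (pvPs d).flatMap (fun p => (pvBws d p).map (fun _ => p)) := by
    rw [List.map_flatMap]
    refine List.flatMap_congr (fun p _ => ?_)
    rw [List.map_map]
    rfl
  rw [hps, pvDedupBlocks (pvPs d) (fun p => pvBws d p) hnd hne]
  unfold pvRhs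
  refine List.map_congr_left (fun c hc => ?_)
  show (c, (((pvPs d).flatMap (fun p => (pvBws d p).map
      (fun bw => (p, pvPick ((pvGrp d p).filter (fun e => pvBk e == bw)))))).filter
        (fun q => (fun q : Int × PvE => q.1) q == c)).map (fun x => x.2))
    = (c, (pvBws d c).map (fun bw => pvPick (pvGB d c bw)))
  have hfil := pvFilterBlocks (pvPs d)
    (fun p => (pvBws d p).map (fun bw => (p, pvPick ((pvGrp d p).filter (fun e => pvBk e == bw)))))
    (fun q => q.1)
    (fun p _ x hx => by rcases List.mem_map.mp hx with ⟨bw, _, rfl⟩; rfl)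
    hnd c hc
  rw [hfil, List.map_map]
  rfl


-- ---------- characterizing port B ----------
def pvRun (b : Option PvE) (g : List PvE) : Option PvE :=
  g.foldl (fun a e => match a with
    | none => some e
    | some c => if pvLtb (pvF e) (pvF c) then some e else some c) b

def pvStepB (b : PySem.Dict (Int × Int) PvE) (entry : PvE) : PySem.Dict (Int × Int) PvE :=
  let k := (pvGet entry "bit_precision", pvGet entry "bandwidth")
  match b.get? k with
  | none => b.insert k entry
  | some cur =>
    if pvGet entry "delay" < pvGet cur "delay" ∨
       (pvGet entry "delay" = pvGet cur "delay" ∧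
        pvGet entry "crossbar_size" < pvGet cur "crossbar_size") then
      b.insert k entry
    else b

theorem pvStepB_eq (b : PySem.Dict (Int × Int) PvE) (e : PvE) :
    pvStepB b e = match b.get? (pvKey e) with
      | none => b.insert (pvKey e) e
      | some cur => if pvLtb (pvF e) (pvF cur) then b.insert (pvKey e) e else b := by
  have hshow : pvStepB b e = (match b.get? (pvKey e) with
      | none => b.insert (pvKey e) e
      | some cur => if pvGet e "delay" < pvGet cur "delay" ∨
          (pvGet e "delay" = pvGet cur "delay" ∧
           pvGet e "crossbar_size" < pvGet cur "crossbar_size")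
          then b.insert (pvKey e) e else b) := rfl
  rw [hshow]
  rcases h : b.get? (pvKey e) with _ | cur
  · rfl
  · have hiff : (pvGet e "delay" < pvGet cur "delay" ∨
        (pvGet e "delay" = pvGet cur "delay" ∧
         pvGet e "crossbar_size" < pvGet cur "crossbar_size"))
        ↔ pvLtb (pvF e) (pvF cur) = true := by
      rw [pvLtb_iff]; exact Iff.rfl
    simp only [hiff]

theorem pvBestGet (l : List PvE) (b : PySem.Dict (Int × Int) PvE) (k : Int × Int) :
    (l.foldl pvStepB b).get? k = pvRun (b.get? k) (l.filter (fun e => pvKey e == k)) := by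
  induction l generalizing b with
  | nil => rfl
  | cons e l ih =>
      rw [List.foldl_cons, ih, List.filter_cons]
      by_cases hk : pvKey e = k
      · subst hk
        simp only [beq_self_eq_true, if_pos]
        have hstep : (pvStepB b e).get? (pvKey e) = match b.get? (pvKey e) with
            | none => some e
            | some cur => if pvLtb (pvF e) (pvF cur) then some e else some cur := by
          rw [pvStepB_eq]
          rcases h : b.get? (pvKey e) with _ | cur
          · simp [h, PySem.Dict.get?_insert_self]
          · by_cases hlt : pvLtb (pvF e) (pvF cur) = true
            · simp [h, hlt, PySem.Dict.get?_insert_self]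
            · simp [h, hlt]
        rw [hstep]
        rcases h : b.get? (pvKey e) with _ | cur <;> rfl
      · have hbk : (pvKey e == k) = false := beq_eq_false_iff_ne.mpr hk
        rw [hbk, if_neg (by simp)]
        have hstep : (pvStepB b e).get? k = b.get? k := by
          rw [pvStepB_eq]
          rcases h : b.get? (pvKey e) with _ | cur
          · exact PySem.Dict.get?_insert_of_ne b e (fun hh => hk hh.symm)
          · by_cases hlt : pvLtb (pvF e) (pvF cur) = true
            · simp only [hlt, if_pos]
              exact PySem.Dict.get?_insert_of_ne b e (fun hh => hk hh.symm)
            · simp [hlt]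
        rw [hstep]

theorem pvBestKeys (l : List PvE) (b : PySem.Dict (Int × Int) PvE) :
    (l.foldl pvStepB b).keys = PySem.Set.update b.keys (l.map pvKey) := by
  induction l generalizing b with
  | nil => rfl
  | cons e l ih =>
      rw [List.foldl_cons, ih, List.map_cons, PySem.Set.update_cons]
      congr 1
      rw [pvStepB_eq]
      rcases h : b.get? (pvKey e) with _ | cur
      · have hnc : b.contains (pvKey e) = false := by
          rw [PySem.Dict.contains_eq_isSome_get?, h]; rfl
        have hnm : pvKey e ∉ b.keys := by
          rw [← PySem.Dict.contains_iff_mem_keys]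
          simp [hnc]
        rw [PySem.Dict.keys_insert_of_not_contains b e hnc]
        simp [PySem.Set.add, PySem.Set.contains, List.contains_eq_mem, hnm]
      · have hc : b.contains (pvKey e) = true := by
          rw [PySem.Dict.contains_eq_isSome_get?, h]; rfl
        have hm : pvKey e ∈ b.keys := (PySem.Dict.contains_iff_mem_keys b (pvKey e)).mp hc
        by_cases hlt : pvLtb (pvF e) (pvF cur) = true
        · simp only [hlt, if_pos]
          rw [PySem.Dict.keys_insert_of_contains b e hc]
          simp [PySem.Set.add, PySem.Set.contains, List.contains_eq_mem, hm]
        · simp only [hlt, if_neg]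
          simp [PySem.Set.add, PySem.Set.contains, List.contains_eq_mem, hm]

theorem pvRunSome (t : List PvE) (h : PvE) :
    pvRun (some h) t = some (t.foldl (fun a e => if pvLtb (pvF e) (pvF a) then e else a) h) := by
  induction t generalizing h with
  | nil => rfl
  | cons e t ih =>
      show pvRun (if pvLtb (pvF e) (pvF h) then some e else some h) t = _
      rw [List.foldl_cons]
      by_cases hlt : pvLtb (pvF e) (pvF h) = true
      · rw [if_pos hlt, if_pos hlt, ih]
      · rw [if_neg hlt, if_neg hlt, ih]

def pvPickB (g : List PvE) : PvE :=
  match g with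
  | [] => []
  | h :: t => pvFm pvF h t

theorem pvRunNone (g : List PvE) : (pvRun none g).getD [] = pvPickB g := by
  cases g with
  | nil => rfl
  | cons h t =>
      show (pvRun (some h) t).getD [] = _
      rw [pvRunSome, Option.getD_some, pvFoldlFm]
      rfl

theorem pvOfListAddMap {α β : Type} [BEq α] [LawfulBEq α] [BEq β] [LawfulBEq β] (f : α → β)
    (s : PySem.Set α) (x : α) :
    PySem.Set.ofList ((PySem.Set.add s x).map f)
      = PySem.Set.add (PySem.Set.ofList (s.map f)) (f x) := by
  by_cases hx : x ∈ s
  · have hfx : f x ∈ PySem.Set.ofList (s.map f) := by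
      rw [← PySem.List.dedup_eq_ofList, PySem.List.mem_dedup]
      exact List.mem_map_of_mem hx
    simp [PySem.Set.add, PySem.Set.contains, hx, hfx]
  · simp only [PySem.Set.add, PySem.Set.contains]
    rw [if_neg (by simpa using hx)]
    rw [List.map_append, List.map_singleton, PySem.Set.ofList_append]
    rw [PySem.Set.update_cons]
    rfl

theorem pvOfListUpdateMap {α β : Type} [BEq α] [LawfulBEq α] [BEq β] [LawfulBEq β] (f : α → β)
    (l : List α) (s : PySem.Set α) :
    PySem.Set.ofList ((PySem.Set.update s l).map f)
      = PySem.Set.update (PySem.Set.ofList (s.map f)) (l.map f) := by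
  induction l generalizing s with
  | nil => simp [PySem.Set.update]
  | cons x l ih =>
      rw [PySem.Set.update_cons, ih, pvOfListAddMap, List.map_cons, PySem.Set.update_cons]

theorem pvDedupMapDedup {α β : Type} [BEq α] [LawfulBEq α] [BEq β] [LawfulBEq β] (f : α → β) (l : List α) :
    PySem.List.dedup ((PySem.List.dedup l).map f) = PySem.List.dedup (l.map f) := by
  have h := pvOfListUpdateMap f l []
  simpa [PySem.List.dedup_eq_ofList, ← PySem.Set.update_nil_left] using h

theorem pvBeqPair (e : PvE) (c bw : Int) :
    (pvKey e == (c, bw)) = (pvPk e == c && pvBk e == bw) := by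
  rw [Bool.eq_iff_iff]
  simp [pvKey, Prod.ext_iff]

def pvBestD (data_entries : List (List (String × Option Int))) : PySem.Dict (Int × Int) PvE :=
  data_entries.foldl (fun b e =>
    let entry := pvNorm e
    if entry.any (fun p => p.2.isNone) then b
    else
      let k := (pvGet entry "bit_precision", pvGet entry "bandwidth")
      match b.get? k with
      | none => b.insert k entry
      | some cur =>
        if pvGet entry "delay" < pvGet cur "delay" ∨
           (pvGet entry "delay" = pvGet cur "delay" ∧
            pvGet entry "crossbar_size" < pvGet cur "crossbar_size") then
          b.insert k entry
        else b) PySem.Dict.empty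

theorem pvBPhases (d : List (List (String × Option Int))) :
    filter_lowest_delay_by_precision_alt d
      = ((pvBestD d).items.foldl (fun r ke => r.modify ke.1.1 [] (· ++ [ke.2]))
          PySem.Dict.empty).items := rfl

theorem pvBestDEq (d : List (List (String × Option Int))) :
    pvBestD d = (pvKept d).foldl pvStepB PySem.Dict.empty := by
  unfold pvBestD pvKept
  rw [List.foldl_filter, List.foldl_map]
  refine PySem.List.foldl_congr_mem _ _ _ _ (fun b e _ => ?_)
  show (if (pvNorm e).any (fun p => p.2.isNone) then b else pvStepB b (pvNorm e))
    = (if pvKeepB (pvNorm e) then pvStepB b (pvNorm e) else b)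
  rw [pvAnyNone]
  cases hkeep : pvKeepB (pvNorm e) <;> simp [hkeep]

theorem pvBEq (d : List (List (String × Option Int))) :
    filter_lowest_delay_by_precision_alt d = pvRhs d := by
  rw [pvBPhases, pvBestDEq]
  set K := PySem.List.dedup ((pvKept d).map pvKey) with hK
  have hkeys : ((pvKept d).foldl pvStepB PySem.Dict.empty).keys = K := by
    rw [pvBestKeys, PySem.Dict.keys_empty, PySem.Set.update_nil_left,
      ← PySem.List.dedup_eq_ofList]
  have hnodup : ((pvKept d).foldl pvStepB PySem.Dict.empty).keys.Nodup := by
    rw [hkeys, hK, PySem.List.dedup_eq_ofList]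
    exact PySem.Set.nodup_ofList _
  have hitems : ((pvKept d).foldl pvStepB PySem.Dict.empty).items
      = K.map (fun k => (k, pvPickB ((pvKept d).filter (fun e => pvKey e == k)))) := by
    rw [PySem.Dict.items_eq_map_keys _ hnodup ([] : PvE), hkeys]
    refine List.map_congr_left (fun k _ => ?_)
    rw [PySem.Dict.getD_eq_get?_getD, pvBestGet, PySem.Dict.get?_empty, pvRunNone]
  rw [hitems, List.foldl_map]
  have h2 : K.foldl (fun r k => r.modify ((k, pvPickB ((pvKept d).filter
        (fun e => pvKey e == k))) : (Int × Int) × PvE).1.1 []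
        (· ++ [((k, pvPickB ((pvKept d).filter (fun e => pvKey e == k))) : (Int × Int) × PvE).2]))
        PySem.Dict.empty
      = (K.map (fun k => (k.1, pvPickB ((pvKept d).filter (fun e => pvKey e == k))))).foldl
          (fun r q => r.modify q.1 [] (· ++ [q.2])) PySem.Dict.empty := by
    rw [List.foldl_map]
  rw [h2, pvGroupItems, List.map_map]
  have hfst : PySem.List.dedup (K.map ((fun q : Int × PvE => q.1) ∘
      (fun k : Int × Int => (k.1, pvPickB ((pvKept d).filter (fun e => pvKey e == k))))))
      = pvPs d := by
    have : (K.map ((fun q : Int × PvE => q.1) ∘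
        (fun k : Int × Int => (k.1, pvPickB ((pvKept d).filter (fun e => pvKey e == k))))))
        = K.map (fun k => k.1) := rfl
    rw [this, hK, pvDedupMapDedup, List.map_map]
    rfl
  rw [hfst]
  unfold pvRhs
  refine List.map_congr_left (fun c hc => ?_)
  have hQfil : ((K.map (fun k => (k.1, pvPickB ((pvKept d).filter (fun e => pvKey e == k))))).filter
        (fun p => p.1 == c))
      = (K.filter (fun k => k.1 == c)).map
          (fun k => (k.1, pvPickB ((pvKept d).filter (fun e => pvKey e == k)))) := by
    rw [List.filter_map]
    rfl
  have hKfil : K.filter (fun k : Int × Int => k.1 == c)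
      = (pvBws d c).map (fun bw => (c, bw)) := by
    rw [hK, pvDedupFilter, List.filter_map]
    have hcomp : ((pvKept d).filter ((fun k : Int × Int => k.1 == c) ∘ pvKey))
        = pvGrp d c := rfl
    rw [hcomp]
    have hmapk : (pvGrp d c).map pvKey = ((pvGrp d c).map pvBk).map (fun bw => (c, bw)) := by
      rw [List.map_map]
      refine List.map_congr_left (fun e he => ?_)
      have : pvPk e = c := by
        have := (List.mem_filter.mp he).2
        exact beq_iff_eq.mp this
      simp [pvKey, Function.comp_def, this]
    rw [hmapk, pvDedupMapInj (fun bw => (c, bw)) (fun a b hab => by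
      simpa [Prod.ext_iff] using hab)]
    rfl
  rw [hQfil, hKfil, List.map_map, List.map_map]
  have : ((((fun x : Int × PvE => x.2) ∘
      (fun k : Int × Int => (k.1, pvPickB ((pvKept d).filter (fun e => pvKey e == k))))) ∘
        (fun bw => (c, bw))))
      = fun bw => pvPickB ((pvKept d).filter (fun e => pvKey e == (c, bw))) := rfl
  rw [this]
  refine congrArg _ (List.map_congr_left (fun bw hbw => ?_))
  have hfe : (pvKept d).filter (fun e => pvKey e == (c, bw)) = pvGB d c bw := by
    rw [List.filter_congr (fun e _ => pvBeqPair e c bw)]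
    unfold pvGB pvGrp
    rw [List.filter_filter]
    exact List.filter_congr (fun e _ => by rw [Bool.and_comm])
  rw [hfe]
  have hne : pvGB d c bw ≠ [] := by
    unfold pvBws at hbw
    rw [PySem.List.mem_dedup] at hbw
    rcases List.mem_map.mp hbw with ⟨e, he, rfl⟩
    exact List.ne_nil_of_mem (List.mem_filter.mpr ⟨he, by simp⟩)
  cases hg : pvGB d c bw with
  | nil => exact absurd hg hne
  | cons h t => rw [pvPickEq]; rfl

theorem pvMain (d : List (List (String × Option Int))) :
    filter_lowest_delay_by_precision d = filter_lowest_delay_by_precision_alt d := by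
  rw [pvAEq, pvBEq]

-- ===== VERDICT (by name: the statement is the Claim_ definition above) =====
theorem filter_lowest_delay_by_precision_spec : Claim_equal_filter_lowest_delay_by_precision := by
  intro d _ _
  unfold Spec_filter_lowest_delay_by_precision
  exact pvMain d
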